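-- pv_equiv track=rewrite | github.com/d4sd1ng/Web_Server | compose_optimieren.py | find_insert_position
-- ===== SOURCE A (Python) =====
-- def find_insert_position(lines, start_idx, end_idx):
--     preferred_keys = (
--         "restart:",
--         "mem_limit:",
--         "cpus:",
--         "pids_limit:",
--         "container_name:",
--         "image:",
--     )
--     last_match = None
--     for i in range(start_idx + 1, end_idx):
--         stripped = lines[i].strip()
--         if any(stripped.startswith(k) for k in preferred_keys):
--             last_match = i
--     if last_match is not None:
--         return last_match + 1
--     return start_idx + 1
-- ===== SOURCE B (Python) =====
-- def find_insert_position(lines, start_idx, end_idx):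
--     preferred_keys = (
--         "restart:",
--         "mem_limit:",
--         "cpus:",
--         "pids_limit:",
--         "container_name:",
--         "image:",
--     )
--     i = end_idx - 1
--     while i > start_idx:
--         if lines[i].strip().startswith(preferred_keys):
--             return i + 1
--         i -= 1
--     return start_idx + 1
-- ===== Notes on version B (the rewrite author's own statement) =====
-- stated objective: alternative
-- what changed: Replaces the forward foldl-scan with a last_match accumulator by a countdown while-loop from end_idx-1 that returns i+1 on its first (i.e. last forward) match, with no accumulator; ported as structural recursion on the remaining loop count.
-- outside the precondition, e.g. on find_insert_position([], 0, 2): A raises IndexError, B raises IndexError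
import Mathlib
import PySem

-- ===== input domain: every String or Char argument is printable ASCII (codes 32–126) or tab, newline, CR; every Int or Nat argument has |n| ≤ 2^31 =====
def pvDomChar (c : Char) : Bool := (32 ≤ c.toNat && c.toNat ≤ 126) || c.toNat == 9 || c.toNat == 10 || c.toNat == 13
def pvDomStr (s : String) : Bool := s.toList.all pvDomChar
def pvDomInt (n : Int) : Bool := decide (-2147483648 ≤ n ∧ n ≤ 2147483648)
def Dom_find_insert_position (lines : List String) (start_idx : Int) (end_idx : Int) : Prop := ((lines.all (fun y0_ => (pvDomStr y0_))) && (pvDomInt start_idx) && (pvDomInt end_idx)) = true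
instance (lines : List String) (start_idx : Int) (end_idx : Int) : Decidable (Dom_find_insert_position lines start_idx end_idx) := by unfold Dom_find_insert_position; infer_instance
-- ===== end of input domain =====

-- B replaces A's forward foldl with a last_match accumulator by a countdown while-loop
-- (structural recursion on the remaining iteration count) returning on its first match;
-- return values only, no mutation. Objective: alternative decomposition.

-- ===== PORT A =====
-- the literal key tuple both Pythons carry
def fipKeys : List String :=
  ["restart:", "mem_limit:", "cpus:", "pids_limit:", "container_name:", "image:"]

-- A's per-index test: stripped lines[i] starts with one of the keys
-- (lines[i] via pyGet?; Pre_ rules out IndexError)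
def fipMatch (lines : List String) (i : Int) : Bool :=
  fipKeys.any (fun k =>
    PySem.Str.startswith (PySem.Str.strip ((PySem.List.pyGet? lines i).getD "")) k)

def find_insert_position (lines : List String) (start_idx : Int) (end_idx : Int) : Int :=
  match (PySem.List.pyRange (start_idx + 1) end_idx 1).foldl
      (fun last_match i => if fipMatch lines i then some i else last_match)
      (none : Option Int) with
  | some i => i + 1
  | none => start_idx + 1

-- ===== PORT B =====
-- B's per-line test, on the line itself (none = index out of range, treated as no match)
def fipHit : Option String → Bool
  | some s => fipKeys.any (fun k => PySem.Str.startswith (PySem.Str.strip s) k)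
  | none => false

-- the while-loop 'while i > start_idx: … i -= 1' as recursion on the remaining count
def fipScan (lines : List String) (start_idx : Int) : Nat → Int → Int
  | 0, _ => start_idx + 1
  | n + 1, i =>
      if fipHit (PySem.List.pyGet? lines i) then i + 1
      else fipScan lines start_idx n (i - 1)

def find_insert_position_alt (lines : List String) (start_idx : Int) (end_idx : Int) : Int :=
  fipScan lines start_idx (end_idx - 1 - start_idx).toNat (end_idx - 1)

-- ===== PRECONDITION & SPEC =====
-- Pre_: the iterated range is empty or every index start_idx+1 .. end_idx-1 is a valid
-- Python index of lines (else the Python A raises IndexError).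
def Pre_find_insert_position (lines : List String) (start_idx : Int) (end_idx : Int) : Prop :=
  end_idx ≤ start_idx + 1 ∨
    (-(lines.length : Int) ≤ start_idx + 1 ∧ end_idx ≤ (lines.length : Int))
instance (lines : List String) (start_idx : Int) (end_idx : Int) :
    Decidable (Pre_find_insert_position lines start_idx end_idx) := by
  unfold Pre_find_insert_position; infer_instance

def pvWitness_find_insert_position : List String × Int × Int :=
  (["version: 3", "  image: nginx", "  restart: always", "ports:"], 0, 4)

def Spec_find_insert_position (lines : List String) (start_idx : Int) (end_idx : Int) (out : Int) : Prop := out = find_insert_position_alt lines start_idx end_idx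
instance (lines : List String) (start_idx : Int) (end_idx : Int) (out : Int) : Decidable (Spec_find_insert_position lines start_idx end_idx out) := by unfold Spec_find_insert_position; infer_instance

-- ===== CLAIM (what is proved, stated in full; the proofs are below) =====
def Claim_equal_find_insert_position : Prop := ∀ (lines : List String) (start_idx : Int) (end_idx : Int), Dom_find_insert_position lines start_idx end_idx → Pre_find_insert_position lines start_idx end_idx → Spec_find_insert_position lines start_idx end_idx (find_insert_position lines start_idx end_idx)

-- ===== LEMMAS AND PROOFS =====

-- the two per-index tests agree
theorem fipHit_eq_fipMatch (lines : List String) (i : Int) :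
    fipHit (PySem.List.pyGet? lines i) = fipMatch lines i := by
  unfold fipHit fipMatch
  cases PySem.List.pyGet? lines i with
  | none => simp; decide
  | some s => simp

-- last match kept by a left fold = first match of the reversed list (falling back to init)
theorem foldl_last_match (p : Int → Bool) (l : List Int) (init : Option Int) :
    l.foldl (fun acc i => if p i then some i else acc) init
      = (l.reverse.find? p).or init := by
  induction l using List.reverseRecOn generalizing init with
  | nil => simp
  | append_singleton l' x ih =>
    simp only [List.foldl_append, List.foldl_cons, List.foldl_nil,
      List.reverse_append, List.reverse_singleton, List.singleton_append, List.find?]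
    by_cases h : p x
    · simp [h]
    · simp [h, ih]

-- the countdown scan = first match of the reversed ascending range
theorem fipScan_eq_find? (lines : List String) (s : Int) (n : Nat) :
    fipScan lines s n (s + n)
      = match (PySem.List.pyRange (s + 1) (s + 1 + n) 1).reverse.find? (fipMatch lines) with
        | some k => k + 1
        | none => s + 1 := by
  induction n with
  | zero => simp [fipScan]
  | succ n ih =>
    have hsplit : PySem.List.pyRange (s + 1) (s + 1 + (n + 1 : Nat)) 1
        = PySem.List.pyRange (s + 1) (s + 1 + n) 1 ++ [s + 1 + n] := by
      have := PySem.List.pyRange_one_succ_right (a := s + 1) (b := s + 1 + n) (by omega)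
      rw [show (s + 1 + (n + 1 : Nat) : Int) = s + 1 + n + 1 by push_cast; ring, this]
    rw [hsplit]
    simp only [List.reverse_append, List.reverse_singleton, List.singleton_append, List.find?]
    have hi : s + (n + 1 : Nat) = s + 1 + n := by push_cast; ring
    rw [hi]
    show (if fipHit (PySem.List.pyGet? lines (s + 1 + n)) then s + 1 + n + 1
          else fipScan lines s n (s + 1 + n - 1)) = _
    rw [fipHit_eq_fipMatch]
    by_cases h : fipMatch lines (s + 1 + n)
    · simp [h]
    · simp only [h, if_false, Bool.false_eq_true]
      rw [show s + 1 + n - 1 = s + (n : Int) by ring]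
      exact_mod_cast ih

-- ===== VERDICT (by name: the statement is the Claim_ definition above) =====
theorem find_insert_position_spec : Claim_equal_find_insert_position := by
  intro lines s e _ _
  unfold Spec_find_insert_position find_insert_position find_insert_position_alt
  rw [foldl_last_match]
  by_cases he : e ≤ s + 1
  · have h0 : (e - 1 - s).toNat = 0 := by omega
    rw [h0, PySem.List.pyRange_one_eq_nil he]
    simp [fipScan]
  · have hn : e - 1 = s + ((e - 1 - s).toNat : Int) := by omega
    have he' : s + 1 + ((e - 1 - s).toNat : Int) = e := by omega
    have key := fipScan_eq_find? lines s (e - 1 - s).toNat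
    rw [← hn, he'] at key
    rw [key]
    cases (PySem.List.pyRange (s + 1) e 1).reverse.find? (fipMatch lines) <;> simp [Option.or]
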